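-- pv_equiv track=rewrite | github.com/mphpX/baekj | 프로그래머스/3/12987. 숫자 게임/숫자 게임.py | solution
-- ===== SOURCE A (Python) =====
-- def solution(A, B):
--     B.sort()
--     A.sort()
--     i,j=0,0
--     answer= 0
--     while(i< len(A) and j< len(B)):
--         if(A[i]>=B[j]):
--             j+=1
--         else:
--             answer+=1
--             i+=1
--             j+=1
--     return answer
-- ===== SOURCE B (Python) =====
-- def solution(A, B):
--     # Hall-deficiency formula: the greedy maximum number of pairs (a, b) with b > a
--     # equals n - max(0, max_i ((n - i) - #{b in B : b > A[i]})) over sorted A.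
--     # Computed with a single merge pointer k = #{b in B : b <= A[i]}.
--     A.sort()
--     B.sort()
--     n, m = len(A), len(B)
--     k = 0
--     deficiency = 0
--     for i in range(n):
--         while k < m and B[k] <= A[i]:
--             k += 1
--         d = (n - i) - (m - k)
--         if deficiency < d:
--             deficiency = d
--     return n - deficiency
-- ===== Notes on version B (the rewrite author's own statement) =====
-- stated objective: alternative
-- what changed: A simulates the greedy matching itself with two pointers over sorted A and B; B never builds any matching: it evaluates the closed-form Hall-deficiency identity answer = n - max(0, max_i ((n-i) - #{b in B : b > A[i]})) with a single merge pointer counting how many B elements each sorted A element dominates.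
import Mathlib
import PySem

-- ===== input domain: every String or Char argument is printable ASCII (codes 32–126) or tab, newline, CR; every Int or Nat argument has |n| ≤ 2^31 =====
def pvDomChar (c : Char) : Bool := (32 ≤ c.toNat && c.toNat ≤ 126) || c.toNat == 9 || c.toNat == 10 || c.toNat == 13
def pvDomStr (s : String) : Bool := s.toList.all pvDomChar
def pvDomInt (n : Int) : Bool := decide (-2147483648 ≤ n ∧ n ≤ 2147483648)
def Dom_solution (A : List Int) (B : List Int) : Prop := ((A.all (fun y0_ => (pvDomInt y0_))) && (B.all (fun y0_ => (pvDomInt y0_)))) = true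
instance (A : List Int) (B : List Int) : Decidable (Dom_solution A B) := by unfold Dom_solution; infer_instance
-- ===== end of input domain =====

-- B replaces A's greedy matching simulation by the Hall-deficiency identity
-- answer = n - max(0, max_i ((n-i) - #{b in B : b > sortedA[i]})), computed with one merge pointer.
-- Both Pythons sort their list arguments IN PLACE; the equivalence proved here is about the return value.

-- ===== PORT A =====
-- the while loop of A: state (i, j, answer); j strictly increases every iteration, so the
-- loop runs at most len(B) times: fuel = Bs.length is only a totality guard, never exhausted
def solLoopA (As Bs : List Int) : Nat → Nat → Nat → Int → Int
  | 0, _, _, answer => answer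
  | fuel + 1, i, j, answer =>
    if h : i < As.length ∧ j < Bs.length then
      if Bs[j] ≤ As[i] then          -- A[i] >= B[j]
        solLoopA As Bs fuel i (j+1) answer
      else
        solLoopA As Bs fuel (i+1) (j+1) (answer+1)
    else answer

def solution (A : List Int) (B : List Int) : Int :=
  let Bs := PySem.List.sorted B (fun x => x) false
  let As := PySem.List.sorted A (fun x => x) false
  solLoopA As Bs Bs.length 0 0 0

-- ===== PORT B =====
-- the inner 'while k < m and B[k] <= a: k += 1' of Source B (short-circuit kept; index guarded)
def advK (Bs : List Int) (a : Int) (k : Nat) : Nat :=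
  if h : k < Bs.length then
    if Bs[k] ≤ a then advK Bs a (k+1) else k
  else k
termination_by Bs.length - k
decreasing_by omega

-- the body of Source B's 'for i in range(n)' loop; state (i, k, deficiency)
def stepB (n m : Nat) (Bs : List Int) (st : Nat × Nat × Int) (a : Int) : Nat × Nat × Int :=
  let k := advK Bs a st.2.1
  let d : Int := ((n : Int) - st.1) - ((m : Int) - k)
  (st.1 + 1, k, if st.2.2 < d then d else st.2.2)

def solution_alt (A : List Int) (B : List Int) : Int :=
  let As := PySem.List.sorted A (fun x => x) false
  let Bs := PySem.List.sorted B (fun x => x) false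
  let st := As.foldl (stepB As.length Bs.length Bs) (0, 0, 0)
  (As.length : Int) - st.2.2

-- ===== PRECONDITION & SPEC =====
def Spec_solution (A : List Int) (B : List Int) (out : Int) : Prop := out = solution_alt A B
instance (A : List Int) (B : List Int) (out : Int) : Decidable (Spec_solution A B out) := by unfold Spec_solution; infer_instance

-- ===== CLAIM (what is proved, stated in full; the proofs are below) =====
def Claim_equal_solution : Prop := ∀ (A : List Int) (B : List Int), Dom_solution A B → Spec_solution A B (solution A B)

-- ===== LEMMAS AND PROOFS =====

-- ascending greedy (A's algorithm on the list remainders), structural in the second list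
def fGr : List Int → List Int → Int
  | _, [] => 0
  | [], _ :: _ => 0
  | a0 :: as, c :: cs => if c ≤ a0 then fGr (a0 :: as) cs else 1 + fGr as cs

-- the deficiency recursion computed by Source B's sweep, on the list remainders
def defi : List Int → List Int → Int
  | [], _ => 0
  | a0 :: as, b =>
    let b' := b.dropWhile (fun x => decide (x ≤ a0))
    max ((as.length + 1 : Int) - b'.length) (defi as b')

theorem fGr_nil (b : List Int) : fGr [] b = 0 := by cases b <;> rfl

theorem fGr_nil_right (a : List Int) : fGr a [] = 0 := by cases a <;> rfl

theorem defi_nil (a : List Int) : defi a [] = (a.length : Int) := by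
  induction a with
  | nil => rfl
  | cons a0 as ih => simp [defi, ih]

theorem defi_ge (a : List Int) : ∀ b : List Int, (a.length : Int) - b.length ≤ defi a b := by
  induction a with
  | nil => intro b; simp [defi]
  | cons a0 as ih =>
    intro b
    have hlen := List.length_dropWhile_le (fun x => decide (x ≤ a0)) b
    simp only [defi, List.length_cons]
    have h1 := le_max_left ((as.length + 1 : Int) - (b.dropWhile (fun x => decide (x ≤ a0))).length)
      (defi as (b.dropWhile (fun x => decide (x ≤ a0))))
    omega

-- prepending a new minimum c to the B side: the deficiency maxima agree (after ⊔ 0)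
theorem defi_prepend : ∀ (as : List Int) (c : Int) (b : List Int), (c :: b).Pairwise (· ≤ ·) →
    max 0 (max ((as.length : Int) - b.length) (defi as (c :: b))) = max 0 (defi as b) := by
  intro as
  induction as with
  | nil => intro c b _; simp [defi]
  | cons a1 as' ih =>
    intro c b hb
    by_cases hca : c ≤ a1
    · have heq : defi (a1 :: as') (c :: b) = defi (a1 :: as') b := by
        simp [defi, hca]
      have h2 := defi_ge (a1 :: as') b
      simp only [List.length_cons] at h2 ⊢
      rw [heq]
      omega
    · have hbb : b.dropWhile (fun x => decide (x ≤ a1)) = b := by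
        cases b with
        | nil => rfl
        | cons b0 bs =>
          have hc : c ≤ b0 := (List.pairwise_cons.mp hb).1 b0 (by simp)
          have : ¬ b0 ≤ a1 := by omega
          simp [this]
      have h1 : defi (a1 :: as') (c :: b) =
          max ((as'.length + 1 : Int) - (b.length + 1)) (defi as' (c :: b)) := by
        simp [defi, hca]
      have h2 : defi (a1 :: as') b = max ((as'.length + 1 : Int) - b.length) (defi as' b) := by
        simp [defi, hbb]
      have hi := ih c b hb
      simp only [List.length_cons]
      rw [h1, h2]
      omega

-- the greedy count equals n minus the maximal deficiency (B side sorted)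
theorem fGr_eq_defi : ∀ (b : List Int), b.Pairwise (· ≤ ·) →
    ∀ a : List Int, fGr a b = (a.length : Int) - max 0 (defi a b) := by
  intro b
  induction b with
  | nil => intro _ a; rw [fGr_nil_right, defi_nil]; omega
  | cons c cs ih =>
    intro hb a
    cases a with
    | nil => simp [fGr_nil, defi]
    | cons a0 as =>
      by_cases hca : c ≤ a0
      · have hf : fGr (a0 :: as) (c :: cs) = fGr (a0 :: as) cs := by simp [fGr, hca]
        have hd : defi (a0 :: as) (c :: cs) = defi (a0 :: as) cs := by
          simp [defi, hca]
        rw [hf, hd, ih (List.pairwise_cons.mp hb).2 (a0 :: as)]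
      · have hf : fGr (a0 :: as) (c :: cs) = 1 + fGr as cs := by simp [fGr, hca]
        have hd : defi (a0 :: as) (c :: cs) =
            max ((as.length + 1 : Int) - (cs.length + 1)) (defi as (c :: cs)) := by
          simp [defi, hca]
        have hD := defi_prepend as c cs hb
        rw [hf, hd, ih (List.pairwise_cons.mp hb).2 as]
        simp only [List.length_cons]
        omega

-- A's index loop computes the ascending greedy on the list remainders
theorem solLoopA_eq_fGr (As Bs : List Int) : ∀ (fuel i j : Nat) (ans : Int),
    Bs.length ≤ j + fuel →
    solLoopA As Bs fuel i j ans = ans + fGr (As.drop i) (Bs.drop j) := by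
  intro fuel
  induction fuel with
  | zero =>
    intro i j ans hf
    rw [solLoopA, List.drop_eq_nil_of_le (as := Bs) (by omega), fGr_nil_right]
    ring
  | succ fuel ih =>
    intro i j ans hf
    rw [solLoopA]
    by_cases h : i < As.length ∧ j < Bs.length
    · rw [dif_pos h, ← List.getElem_cons_drop h.1, ← List.getElem_cons_drop h.2]
      by_cases hle : Bs[j] ≤ As[i]
      · rw [if_pos hle, ih i (j+1) ans (by omega)]
        simp [fGr, hle]
      · rw [if_neg hle, ih (i+1) (j+1) (ans+1) (by omega)]
        simp only [fGr, if_neg hle]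
        ring
    · rw [dif_neg h]
      rcases not_and_or.mp h with h1 | h1
      · rw [List.drop_eq_nil_of_le (as := As) (by omega), fGr_nil]; ring
      · rw [List.drop_eq_nil_of_le (as := Bs) (by omega), fGr_nil_right]; ring

-- the while-loop pointer: stays in range and lands exactly past the leading elements ≤ a
theorem advK_spec (Bs : List Int) (a : Int) : ∀ (k : Nat), k ≤ Bs.length →
    advK Bs a k ≤ Bs.length ∧
    Bs.drop (advK Bs a k) = (Bs.drop k).dropWhile (fun x => decide (x ≤ a)) := by
  suffices h : ∀ (fuel k : Nat), Bs.length - k ≤ fuel → k ≤ Bs.length →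
      advK Bs a k ≤ Bs.length ∧
      Bs.drop (advK Bs a k) = (Bs.drop k).dropWhile (fun x => decide (x ≤ a)) by
    intro k hk; exact h Bs.length k (by omega) hk
  intro fuel
  induction fuel with
  | zero =>
    intro k hfu hk
    have hk' : k = Bs.length := by omega
    rw [advK, dif_neg (by omega)]
    subst hk'
    simp
  | succ fuel ih =>
    intro k hfu hk
    rw [advK]
    by_cases hlt : k < Bs.length
    · rw [dif_pos hlt]
      rw [← List.getElem_cons_drop hlt, List.dropWhile_cons]
      by_cases hle : Bs[k] ≤ a
      · rw [if_pos hle]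
        have := ih (k+1) (by omega) (by omega)
        simpa [hle] using this
      · rw [if_neg hle]
        simp [hle, hk]
    · rw [dif_neg hlt]
      have : k = Bs.length := by omega
      subst this
      simp

-- Source B's sweep accumulates max df (defi over the remaining lists)
theorem foldB_eq_defi (n : Nat) (Bs : List Int) : ∀ (as : List Int) (i k : Nat) (df : Int),
    i + as.length = n → k ≤ Bs.length → 0 ≤ df →
    (as.foldl (stepB n Bs.length Bs) (i, k, df)).2.2 = max df (defi as (Bs.drop k)) := by
  intro as
  induction as with
  | nil =>
    intro i k df _ _ hdf
    simp [defi]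
    omega
  | cons a as' ih =>
    intro i k df hi hk hdf
    obtain ⟨hk'le, hdrop⟩ := advK_spec Bs a k hk
    rw [List.foldl_cons]
    have hstep : stepB n Bs.length Bs (i, k, df) a
        = (i + 1, advK Bs a k,
            if df < ((n : Int) - i) - ((Bs.length : Int) - advK Bs a k)
            then ((n : Int) - i) - ((Bs.length : Int) - advK Bs a k) else df) := rfl
    rw [hstep, ih (i+1) (advK Bs a k) _
      (by simp only [List.length_cons] at hi; omega) hk'le (by split <;> omega)]
    have hlen' : ((Bs.drop (advK Bs a k)).length : Int) = (Bs.length : Int) - advK Bs a k := by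
      rw [List.length_drop]; omega
    have hd : defi (a :: as') (Bs.drop k) =
        max ((as'.length + 1 : Int) - ((Bs.length : Int) - advK Bs a k)) (defi as' (Bs.drop (advK Bs a k))) := by
      simp only [defi, ← hdrop, hlen']
    rw [hd]
    have hni : (n : Int) - i = (as'.length : Int) + 1 := by
      simp only [List.length_cons] at hi; omega
    rw [hni]
    split <;> omega

-- ===== VERDICT (by name: the statement is the Claim_ definition above) =====
theorem solution_spec : Claim_equal_solution := by
  intro A B _
  unfold Spec_solution solution solution_alt
  dsimp only
  set As := PySem.List.sorted A (fun x => x) false with hAs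
  set Bs := PySem.List.sorted B (fun x => x) false with hBs
  have hB : Bs.Pairwise (· ≤ ·) := PySem.List.sorted_pairwise B (fun x => x)
  rw [solLoopA_eq_fGr As Bs Bs.length 0 0 0 (by omega)]
  rw [foldB_eq_defi As.length Bs As 0 0 0 (by simp) (by omega) (by omega)]
  simp only [List.drop_zero]
  rw [fGr_eq_defi Bs hB As]
  omega
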